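-- pv_equiv track=rewrite | github.com/jubr/whatsapper | homeassistant/custom_components/whatsapper/auto_host_port.py | _matches_target_addon
-- ===== SOURCE A (Python) =====
-- TARGET_ADDON_NAMES = ("whatsappur", "whatsapper")
--
-- def _matches_target_addon(slug: str) -> bool:
--     normalized = slug.lower()
--     for target in TARGET_ADDON_NAMES:
--         if (
--             normalized == target
--             or normalized.endswith(f"_{target}")
--             or normalized.endswith(f"-{target}")
--         ):
--             return True
--     return False
-- ===== SOURCE B (Python) =====
-- _TARGET_TAILS = frozenset(("whatsappur", "whatsapper"))
--
-- def _matches_target_addon(slug: str) -> bool: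
--     # One reverse scan: collect the trailing token (the chars after the last '-'/'_'),
--     # then a single set membership test.
--     tail_rev = []
--     for ch in reversed(slug.lower()):
--         if ch in "-_":
--             break
--         tail_rev.append(ch)
--     return "".join(reversed(tail_rev)) in _TARGET_TAILS
-- ===== Notes on version B (the rewrite author's own statement) =====
-- stated objective: idiomatic
-- what changed: Instead of looping over the two target names and testing equality/endswith for each, B extracts the trailing token (the part after the last '-'/'_') of the lowered slug in one reverse scan and performs a single set-membership test.
import Mathlib
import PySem

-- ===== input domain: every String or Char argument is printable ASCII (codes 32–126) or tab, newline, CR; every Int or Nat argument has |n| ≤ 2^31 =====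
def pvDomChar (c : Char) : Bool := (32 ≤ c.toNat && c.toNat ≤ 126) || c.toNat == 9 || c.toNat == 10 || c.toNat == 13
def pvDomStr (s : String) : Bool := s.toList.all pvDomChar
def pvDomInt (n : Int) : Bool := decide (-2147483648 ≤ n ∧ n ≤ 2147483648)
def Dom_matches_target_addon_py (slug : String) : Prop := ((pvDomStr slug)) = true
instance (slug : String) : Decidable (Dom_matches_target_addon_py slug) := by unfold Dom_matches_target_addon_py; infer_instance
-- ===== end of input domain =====

-- B replaces A's per-target equality/endswith loop by extracting the trailing token once
-- (one reverse scan) and a single set-membership test; same cost, more idiomatic.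

-- ===== PORT A =====
-- the module constant TARGET_ADDON_NAMES, as char lists (exact for these ASCII literals)
def pvTarget1 : List Char := ['w','h','a','t','s','a','p','p','u','r']
def pvTarget2 : List Char := ['w','h','a','t','s','a','p','p','e','r']

-- the for-loop over TARGET_ADDON_NAMES with its early return
def pvALoop (normalized : List Char) : List (List Char) → Bool
  | [] => false
  | t :: ts =>
    if normalized == t
        || PySem.Chars.endswith normalized ('_' :: t)
        || PySem.Chars.endswith normalized ('-' :: t) then
      true
    else
      pvALoop normalized ts

def matches_target_addon_py (slug : String) : Bool :=
  pvALoop (PySem.Str.lower slug).toList [pvTarget1, pvTarget2]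

-- ===== PORT B =====
-- the reverse for-loop with break: collects chars until the first separator
def pvTailRev : List Char → List Char
  | [] => []
  | c :: rest => if c = '-' || c = '_' then [] else c :: pvTailRev rest

def matches_target_addon_py_alt (slug : String) : Bool :=
  let tail := (pvTailRev (PySem.Str.lower slug).toList.reverse).reverse
  tail == pvTarget1 || tail == pvTarget2

-- ===== PRECONDITION & SPEC =====
def Spec_matches_target_addon_py (slug : String) (out : Bool) : Prop := out = matches_target_addon_py_alt slug
instance (slug : String) (out : Bool) : Decidable (Spec_matches_target_addon_py slug out) := by unfold Spec_matches_target_addon_py; infer_instance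

-- ===== CLAIM (what is proved, stated in full; the proofs are below) =====
def Claim_equal_matches_target_addon_py : Prop := ∀ (slug : String), Dom_matches_target_addon_py slug → Spec_matches_target_addon_py slug (matches_target_addon_py slug)

-- ===== LEMMAS AND PROOFS =====
set_option maxRecDepth 10000
set_option maxHeartbeats 1000000

-- the trailing token (reversed) equals tr  ↔  the whole string is tr or tr is followed by a separator
theorem pvTailRev_eq_iff (tr : List Char) (ht : ∀ c ∈ tr, c ≠ '-' ∧ c ≠ '_') (rs : List Char) :
    pvTailRev rs = tr ↔ (rs = tr ∨ tr ++ ['_'] <+: rs ∨ tr ++ ['-'] <+: rs) := by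
  induction tr generalizing rs with
  | nil =>
    cases rs with
    | nil => simp [pvTailRev]
    | cons c rest =>
      simp only [pvTailRev, List.nil_append]
      split_ifs with hc
      · have hc' : c = '-' ∨ c = '_' := by simpa using hc
        constructor
        · intro _
          rcases hc' with rfl | rfl
          · exact Or.inr (Or.inr (by simp [List.cons_prefix_cons]))
          · exact Or.inr (Or.inl (by simp [List.cons_prefix_cons]))
        · intro _; rfl
      · have hc' : ¬(c = '-') ∧ ¬(c = '_') := by
          constructor <;> intro h <;> exact hc (by simp [h])
        simp only [List.cons_prefix_cons]
        constructor
        · intro h; exact absurd h (by simp)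
        · rintro (h | ⟨h, -⟩ | ⟨h, -⟩)
          · exact absurd h (by simp)
          · exact absurd h.symm hc'.2
          · exact absurd h.symm hc'.1
  | cons a tr' ih =>
    have ha := ht a (List.mem_cons_self ..)
    cases rs with
    | nil =>
      simp only [pvTailRev]
      constructor
      · intro h; exact absurd h (by simp)
      · rintro (h | h | h)
        · exact absurd h (by simp)
        · exact absurd h (by simp)
        · exact absurd h (by simp)
    | cons c rest =>
      have ih' := ih (fun c hc => ht c (List.mem_cons_of_mem _ hc)) rest
      simp only [pvTailRev, List.cons_append, List.cons_prefix_cons]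
      split_ifs with hc
      · have hc' : c = '-' ∨ c = '_' := by simpa using hc
        constructor
        · intro h; exact absurd h (by simp)
        · rintro (h | ⟨h, -⟩ | ⟨h, -⟩)
          · injection h with h1 _
            rcases hc' with rfl | rfl <;>
              first
                | exact absurd h1 ha.1 | exact absurd h1.symm ha.1
                | exact absurd h1 ha.2 | exact absurd h1.symm ha.2
          · rcases hc' with rfl | rfl <;>
              first
                | exact absurd h ha.1 | exact absurd h.symm ha.1
                | exact absurd h ha.2
          · rcases hc' with rfl | rfl <;>
              first
                | exact absurd h ha.1 | exact absurd h.symm ha.1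
                | exact absurd h ha.2
      · constructor
        · intro h
          rw [List.cons.injEq] at h
          rcases h with ⟨rfl, h2⟩
          rcases ih'.mp h2 with h3 | h3 | h3
          · exact Or.inl (by rw [h3])
          · exact Or.inr (Or.inl ⟨rfl, h3⟩)
          · exact Or.inr (Or.inr ⟨rfl, h3⟩)
        · rintro (h | ⟨rfl, h2⟩ | ⟨rfl, h2⟩)
          · rw [List.cons.injEq] at h
            rcases h with ⟨rfl, rfl⟩
            rw [List.cons.injEq]
            exact ⟨rfl, ih'.mpr (Or.inl rfl)⟩
          · rw [List.cons.injEq]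
            exact ⟨rfl, ih'.mpr (Or.inr (Or.inl h2))⟩
          · rw [List.cons.injEq]
            exact ⟨rfl, ih'.mpr (Or.inr (Or.inr h2))⟩

-- A's three-way test for one separator-free target ↔ B's trailing token equals that target
theorem pv_cond_iff (n t : List Char) (ht : ∀ c ∈ t, c ≠ '-' ∧ c ≠ '_') :
    (n = t ∨ ('_' :: t) <:+ n ∨ ('-' :: t) <:+ n) ↔ (pvTailRev n.reverse).reverse = t := by
  have h1 : ('_' :: t) <:+ n ↔ t.reverse ++ ['_'] <+: n.reverse := by
    rw [← List.reverse_prefix]; simp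
  have h2 : ('-' :: t) <:+ n ↔ t.reverse ++ ['-'] <+: n.reverse := by
    rw [← List.reverse_prefix]; simp
  have h3 : n = t ↔ n.reverse = t.reverse := by
    constructor
    · rintro rfl; rfl
    · intro h; simpa using congrArg List.reverse h
  have h4 : (pvTailRev n.reverse).reverse = t ↔ pvTailRev n.reverse = t.reverse := by
    constructor
    · intro h; simpa using congrArg List.reverse h
    · intro h; simp [h]
  rw [h1, h2, h3, h4, pvTailRev_eq_iff t.reverse (by simpa using ht) n.reverse]

theorem pv_ht1 : ∀ c ∈ pvTarget1, c ≠ '-' ∧ c ≠ '_' := by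
  intro c hc
  fin_cases hc <;> exact ⟨by decide, by decide⟩
theorem pv_ht2 : ∀ c ∈ pvTarget2, c ≠ '-' ∧ c ≠ '_' := by
  intro c hc
  fin_cases hc <;> exact ⟨by decide, by decide⟩

-- the two-target loop equals the single membership test of the trailing token
theorem pv_main (n : List Char) :
    pvALoop n [pvTarget1, pvTarget2]
      = ((pvTailRev n.reverse).reverse == pvTarget1
          || (pvTailRev n.reverse).reverse == pvTarget2) := by
  have c1 := pv_cond_iff n pvTarget1 pv_ht1
  have c2 := pv_cond_iff n pvTarget2 pv_ht2
  simp only [pvALoop]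
  rcases hb1 : (n == pvTarget1
      || PySem.Chars.endswith n ('_' :: pvTarget1)
      || PySem.Chars.endswith n ('-' :: pvTarget1)) with _ | _
  · -- first condition false
    have hp1 : ¬(n = pvTarget1 ∨ ('_' :: pvTarget1) <:+ n
        ∨ ('-' :: pvTarget1) <:+ n) := by
      intro hp
      have hT : (n == pvTarget1
          || PySem.Chars.endswith n ('_' :: pvTarget1)
          || PySem.Chars.endswith n ('-' :: pvTarget1)) = true := by
        simp only [Bool.or_eq_true, beq_iff_eq, PySem.Chars.endswith_iff]
        tauto
      rw [hb1] at hT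
      exact Bool.false_ne_true hT
    have hr1 : ((pvTailRev n.reverse).reverse == pvTarget1) = false := by
      simp only [beq_eq_false_iff_ne]
      exact (not_iff_not.mpr c1).mp hp1
    rcases hb2 : (n == pvTarget2
        || PySem.Chars.endswith n ('_' :: pvTarget2)
        || PySem.Chars.endswith n ('-' :: pvTarget2)) with _ | _
    · -- second condition false
      have hp2 : ¬(n = pvTarget2 ∨ ('_' :: pvTarget2) <:+ n
          ∨ ('-' :: pvTarget2) <:+ n) := by
        intro hp
        have hT : (n == pvTarget2
            || PySem.Chars.endswith n ('_' :: pvTarget2)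
            || PySem.Chars.endswith n ('-' :: pvTarget2)) = true := by
          simp only [Bool.or_eq_true, beq_iff_eq, PySem.Chars.endswith_iff]
          tauto
        rw [hb2] at hT
        exact Bool.false_ne_true hT
      have hr2 : ((pvTailRev n.reverse).reverse == pvTarget2) = false := by
        simp only [beq_eq_false_iff_ne]
        exact (not_iff_not.mpr c2).mp hp2
      rw [hr1, hr2]
      simp
    · -- second condition true
      have hp2 : n = pvTarget2 ∨ ('_' :: pvTarget2) <:+ n
          ∨ ('-' :: pvTarget2) <:+ n := by
        have h' := hb2
        simp only [Bool.or_eq_true, beq_iff_eq, PySem.Chars.endswith_iff] at h'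
        tauto
      have ht2 := c2.mp hp2
      rw [hr1, ht2]
      simp
  · -- first condition true
    have hp1 : n = pvTarget1 ∨ ('_' :: pvTarget1) <:+ n
        ∨ ('-' :: pvTarget1) <:+ n := by
      have h' := hb1
      simp only [Bool.or_eq_true, beq_iff_eq, PySem.Chars.endswith_iff] at h'
      tauto
    have ht := c1.mp hp1
    rw [ht]
    simp

-- ===== VERDICT (by name: the statement is the Claim_ definition above) =====
theorem matches_target_addon_py_spec : Claim_equal_matches_target_addon_py := by
  intro slug _
  unfold Spec_matches_target_addon_py matches_target_addon_py matches_target_addon_py_alt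
  exact pv_main (PySem.Str.lower slug).toList
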